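-- pv_equiv track=rewrite | github.com/qklent/tg_obsidian_sync_bot | bot/handlers.py | _parse_note_preview
-- ===== SOURCE A (Python) =====
-- def _parse_note_preview(content: str, max_chars: int = 600) -> str:
--     """Extract a readable preview from a note, skipping YAML frontmatter."""
--     lines = content.splitlines()
--     body_lines = []
--     in_frontmatter = False
--
--     for i, line in enumerate(lines):
--         if i == 0 and line.strip() == "---":
--             in_frontmatter = True
--             continue
--         if in_frontmatter:
--             if line.strip() == "---":
--                 in_frontmatter = False
--             continue
--         body_lines.append(line)
--
--     body = "\n".join(body_lines).strip()
--     if len(body) > max_chars: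
--         body = body[:max_chars] + "…"
--     return body
-- ===== SOURCE B (Python) =====
-- def _parse_note_preview(content: str, max_chars: int = 600) -> str:
--     """Extract a readable preview from a note, skipping YAML frontmatter."""
--     lines = content.splitlines()
--     fences = [i for i, line in enumerate(lines) if line.strip() == "---"]
--     if fences and fences[0] == 0:
--         body_lines = lines[fences[1] + 1:] if len(fences) >= 2 else []
--     else:
--         body_lines = lines
--     body = "\n".join(body_lines).strip()
--     if len(body) > max_chars:
--         body = body[:max_chars] + "…"
--     return body
-- ===== Notes on version B (the rewrite author's own statement) =====
-- stated objective: alternative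
-- what changed: Instead of A's per-line in_frontmatter state machine, B first computes the list of all delimiter-line indices with one comprehension and then picks the body purely by arithmetic on the first two indices (fences[0]==0 opens, fences[1]+1 starts the body, no second fence means empty body).
import Mathlib
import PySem

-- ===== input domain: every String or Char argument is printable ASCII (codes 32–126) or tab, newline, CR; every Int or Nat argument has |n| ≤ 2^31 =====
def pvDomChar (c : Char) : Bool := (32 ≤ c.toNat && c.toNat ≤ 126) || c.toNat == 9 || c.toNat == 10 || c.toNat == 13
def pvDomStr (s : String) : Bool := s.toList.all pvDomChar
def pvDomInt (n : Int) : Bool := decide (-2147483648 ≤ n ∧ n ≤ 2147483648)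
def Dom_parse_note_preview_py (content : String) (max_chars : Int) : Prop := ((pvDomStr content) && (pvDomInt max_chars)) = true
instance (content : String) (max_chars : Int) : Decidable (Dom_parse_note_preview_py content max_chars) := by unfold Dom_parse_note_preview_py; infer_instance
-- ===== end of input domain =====

-- B replaces A's per-line in_frontmatter state machine with a staged computation: one
-- comprehension collecting all delimiter-line indices, then pure index arithmetic on the
-- first two of them selects the body slice (objective: alternative decomposition).

-- ===== PORT A =====
-- A's loop body: state = (body_lines, in_frontmatter), input = (i, line)
def pnpStep (st : List String × Bool) (p : Int × String) : List String × Bool :=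
  if p.1 == 0 && PySem.Str.strip p.2 == "---" then (st.1, true)
  else if st.2 then
    (if PySem.Str.strip p.2 == "---" then (st.1, false) else (st.1, true))
  else (st.1 ++ [p.2], st.2)

def parse_note_preview_py (content : String) (max_chars : Int) : String :=
  let lines := PySem.Str.splitlines content
  let st := (PySem.List.enumerate lines 0).foldl pnpStep ([], false)
  let body := PySem.Str.strip (PySem.Str.join "\n" st.1)
  if max_chars < (PySem.Str.len body : Int) then
    PySem.Str.slice body none (some max_chars) ++ "…"
  else body

-- ===== PORT B =====
-- B's comprehension: [i for i, line in enumerate(lines) if line.strip() == "---"]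
def pnpFences (ls : List String) (s : Int) : List Int :=
  (PySem.List.enumerate ls s).filterMap
    (fun p => if PySem.Str.strip p.2 == "---" then some p.1 else none)

def parse_note_preview_py_alt (content : String) (max_chars : Int) : String :=
  let lines := PySem.Str.splitlines content
  let fences := pnpFences lines 0
  let body_lines :=
    match fences with
    | [] => lines
    | f0 :: rest =>
      if f0 == 0 then
        match rest with
        | [] => ([] : List String)                        -- len(fences) < 2: no closing fence
        | f1 :: _ => PySem.List.slice lines (some (f1 + 1)) none   -- lines[fences[1] + 1:]
      else lines
  let body := PySem.Str.strip (PySem.Str.join "\n" body_lines)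
  if max_chars < (PySem.Str.len body : Int) then
    PySem.Str.slice body none (some max_chars) ++ "…"
  else body

-- ===== PRECONDITION & SPEC =====
def Spec_parse_note_preview_py (content : String) (max_chars : Int) (out : String) : Prop := out = parse_note_preview_py_alt content max_chars
instance (content : String) (max_chars : Int) (out : String) : Decidable (Spec_parse_note_preview_py content max_chars out) := by unfold Spec_parse_note_preview_py; infer_instance

-- ===== CLAIM (what is proved, stated in full; the proofs are below) =====
def Claim_equal_parse_note_preview_py : Prop := ∀ (content : String) (max_chars : Int), Dom_parse_note_preview_py content max_chars → Spec_parse_note_preview_py content max_chars (parse_note_preview_py content max_chars)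

-- ===== LEMMAS AND PROOFS =====

-- proof-side characterisation of the frontmatter skip: lines after the first fence
def pnpAfterClose : List String → List String
  | [] => []
  | l :: t => if PySem.Str.strip l == "---" then t else pnpAfterClose t

-- once past the frontmatter (flag = false, index ≥ 1), A appends every remaining line
theorem pnp_fold_false (rest : List String) (acc : List String) (s : Int) (hs : 1 ≤ s) :
    (PySem.List.enumerate rest s).foldl pnpStep (acc, false) = (acc ++ rest, false) := by
  induction rest generalizing acc s with
  | nil => simp [PySem.List.enumerate_nil]
  | cons l t ih =>
    have h0 : (s == 0) = false := by simp; omega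
    rw [PySem.List.enumerate_cons, List.foldl_cons,
        show pnpStep (acc, false) (s, l) = (acc ++ [l], false) from by simp [pnpStep, h0],
        ih (acc ++ [l]) (s + 1) (by omega)]
    simp

-- inside frontmatter (flag = true, index ≥ 1), A collects exactly the lines after the
-- first closing '---' (nothing if unterminated)
theorem pnp_fold_true (rest : List String) (acc : List String) (s : Int) (hs : 1 ≤ s) :
    ((PySem.List.enumerate rest s).foldl pnpStep (acc, true)).1 = acc ++ pnpAfterClose rest := by
  induction rest generalizing acc s with
  | nil => simp [PySem.List.enumerate_nil, pnpAfterClose]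
  | cons l t ih =>
    have h0 : (s == 0) = false := by simp; omega
    by_cases hl : PySem.Str.strip l == "---"
    · rw [PySem.List.enumerate_cons, List.foldl_cons,
          show pnpStep (acc, true) (s, l) = (acc, false) from by simp [pnpStep, h0, hl],
          pnp_fold_false t acc (s + 1) (by omega)]
      simp [pnpAfterClose, hl]
    · rw [PySem.List.enumerate_cons, List.foldl_cons,
          show pnpStep (acc, true) (s, l) = (acc, true) from by simp [pnpStep, h0, hl],
          ih acc (s + 1) (by omega)]
      simp [pnpAfterClose, hl]

-- no fence among ls ⇒ nothing survives an unterminated frontmatter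
theorem pnp_afterClose_of_fences_nil (ls : List String) (s : Int)
    (h : pnpFences ls s = []) : pnpAfterClose ls = [] := by
  induction ls generalizing s with
  | nil => rfl
  | cons l t ih =>
    by_cases hl : PySem.Str.strip l = "---"
    · simp [pnpFences, PySem.List.enumerate_cons, hl] at h
    · have hb : (PySem.Str.strip l == "---") = false := by simpa using hl
      simp only [pnpFences, PySem.List.enumerate_cons, List.filterMap_cons, hb] at h
      simp [pnpAfterClose, hl, ih (s + 1) h]

-- the first fence index f1 in ls (enumerated from s) satisfies s ≤ f1, and the lines
-- after the first fence are exactly ls dropped past position f1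
theorem pnp_afterClose_of_fences_cons (ls : List String) (s : Int) (f1 : Int) (t : List Int)
    (h : pnpFences ls s = f1 :: t) :
    s ≤ f1 ∧ pnpAfterClose ls = List.drop (f1 + 1 - s).toNat ls := by
  induction ls generalizing s with
  | nil => simp [pnpFences, PySem.List.enumerate_nil] at h
  | cons l t' ih =>
    by_cases hl : PySem.Str.strip l = "---"
    · have hb : (PySem.Str.strip l == "---") = true := by simpa using hl
      simp only [pnpFences, PySem.List.enumerate_cons, List.filterMap_cons, hb] at h
      injection h with hf ht
      subst hf
      refine ⟨le_refl _, ?_⟩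
      have h1 : (s + 1 - s).toNat = 1 := by omega
      rw [h1]
      simp [pnpAfterClose, hl]
    · have hb : (PySem.Str.strip l == "---") = false := by simpa using hl
      simp only [pnpFences, PySem.List.enumerate_cons, List.filterMap_cons, hb] at h
      obtain ⟨h1, h2⟩ := ih (s + 1) h
      refine ⟨by omega, ?_⟩
      have hk : (f1 + 1 - s).toNat = (f1 + 1 - (s + 1)).toNat + 1 := by omega
      simp [pnpAfterClose, hl, hk, h2]

-- A's loop computes B's fence-arithmetic body_lines
theorem pnp_body_eq (lines : List String) :
    ((PySem.List.enumerate lines 0).foldl pnpStep ([], false)).1 =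
      (match pnpFences lines 0 with
       | [] => lines
       | f0 :: rest =>
         if f0 == 0 then
           match rest with
           | [] => ([] : List String)
           | f1 :: _ => PySem.List.slice lines (some (f1 + 1)) none
         else lines) := by
  match lines with
  | [] => simp [PySem.List.enumerate_nil, pnpFences]
  | l0 :: rest =>
    by_cases h0 : PySem.Str.strip l0 == "---"
    · rw [PySem.List.enumerate_cons, List.foldl_cons,
          show pnpStep ([], false) (0, l0) = ([], true) from by simp [pnpStep, h0],
          pnp_fold_true rest [] (0 + 1) (by omega)]
      have h0' : PySem.Str.strip l0 = "---" := by simpa using h0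
      have hf : pnpFences (l0 :: rest) 0 = 0 :: pnpFences rest 1 := by
        simp [pnpFences, PySem.List.enumerate_cons, h0']
      rw [hf]
      cases hrest : pnpFences rest 1 with
      | nil => simp [pnp_afterClose_of_fences_nil rest 1 hrest]
      | cons f1 t =>
        obtain ⟨hge, hdrop⟩ := pnp_afterClose_of_fences_cons rest 1 f1 t hrest
        have hcast : f1 + 1 = ((f1.toNat + 1 : Nat) : Int) := by omega
        have hslice : PySem.List.slice (l0 :: rest) (some (f1 + 1)) none =
            List.drop (f1.toNat + 1) (l0 :: rest) := by
          rw [hcast, PySem.List.slice_from_natCast]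
        have hk : (f1 + 1 - 1).toNat = f1.toNat := by omega
        simp [hdrop, hslice]
    · rw [PySem.List.enumerate_cons, List.foldl_cons,
          show pnpStep ([], false) (0, l0) = ([l0], false) from by simp [pnpStep, h0],
          pnp_fold_false rest [l0] (0 + 1) (by omega)]
      have h0' : ¬ PySem.Str.strip l0 = "---" := by simpa using h0
      have hf : pnpFences (l0 :: rest) 0 = pnpFences rest 1 := by
        simp [pnpFences, PySem.List.enumerate_cons, h0']
      rw [hf]
      cases hrest : pnpFences rest 1 with
      | nil => simp
      | cons f1 t =>
        obtain ⟨hge, -⟩ := pnp_afterClose_of_fences_cons rest 1 f1 t hrest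
        have : (f1 == 0) = false := by simp; omega
        simp [this]

-- ===== VERDICT (by name: the statement is the Claim_ definition above) =====
theorem parse_note_preview_py_spec : Claim_equal_parse_note_preview_py := by
  intro content max_chars _
  unfold Spec_parse_note_preview_py parse_note_preview_py parse_note_preview_py_alt
  dsimp only
  rw [pnp_body_eq]
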